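-- pv_equiv track=rewrite | github.com/Pix3Ld/encrypted-notepad | application/services/fitering.py | _tags_to_list
-- ===== SOURCE A (Python) =====
-- from typing import List, Optional
--
-- def _tags_to_list(tags: Optional[str]) -> List[str]:
--     if not tags:
--         return []
--     # czyszczenie tagów
--     raw = [p.strip() for part in tags.replace(";", ",").split(";") for p in part.split(",")]
--     out: List[str] = []
--     for item in raw:
--         if not item:
--             continue
--         out.extend([t for t in item.split() if t])
--     return [t.lower() for t in out]
-- ===== SOURCE B (Python) =====
-- from typing import List, Optional
--
-- def _tags_to_list(tags: Optional[str]) -> List[str]: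
--     if not tags:
--         return []
--     out: List[str] = []
--     cur = ""
--     for ch in tags:
--         if ch == "," or ch == ";" or ch.isspace():
--             if cur:
--                 out.append(cur.lower())
--                 cur = ""
--         else:
--             cur += ch
--     if cur:
--         out.append(cur.lower())
--     return out
-- ===== Notes on version B (the rewrite author's own statement) =====
-- stated objective: simpler
-- what changed: A's replace-then-double-split-then-strip-then-whitespace-split pipeline over several intermediate lists is replaced by one single-pass character scan that accumulates the current token and flushes it lowercased at every delimiter (comma, semicolon or whitespace).
import Mathlib
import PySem

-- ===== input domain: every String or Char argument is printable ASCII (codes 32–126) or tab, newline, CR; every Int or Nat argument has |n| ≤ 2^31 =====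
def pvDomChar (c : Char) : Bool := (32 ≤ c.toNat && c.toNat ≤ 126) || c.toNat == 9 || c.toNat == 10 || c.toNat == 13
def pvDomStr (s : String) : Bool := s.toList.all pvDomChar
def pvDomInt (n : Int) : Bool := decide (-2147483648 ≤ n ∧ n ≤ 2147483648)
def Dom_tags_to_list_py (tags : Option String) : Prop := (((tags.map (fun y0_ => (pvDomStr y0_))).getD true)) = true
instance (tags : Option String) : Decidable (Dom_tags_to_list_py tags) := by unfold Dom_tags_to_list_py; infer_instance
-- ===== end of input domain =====

-- B replaces A's replace/split(";")/split(",")/strip/split() pipeline by one single-pass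
-- character scan with a current-token accumulator (objective: simpler, one traversal).


-- ===== PORT A =====
def tags_to_list_py (tags : Option String) : List String :=
  match tags with
  | none => []                                    -- `if not tags` (None is falsy)
  | some s =>
    if s.toList.isEmpty then []                   -- `if not tags` ("" is falsy)
    else
      -- raw = [p.strip() for part in tags.replace(";", ",").split(";") for p in part.split(",")]
      let raw := (PySem.Chars.splitOn (PySem.Chars.replace s.toList [';'] [',']) [';']).flatMap
        (fun part => (PySem.Chars.splitOn part [',']).map (fun p => PySem.Chars.strip p))
      -- out = []; for item in raw: if not item: continue; out.extend([t for t in item.split() if t])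
      let out := raw.foldl (fun out item =>
        if item.isEmpty then out
        else out ++ ((PySem.Chars.split₀ item).filter (fun t => !t.isEmpty))) []
      -- return [t.lower() for t in out]
      out.map (fun t => String.ofList (PySem.Chars.lower t))

-- ===== PORT B =====
-- the delimiter test of Source B's loop: ch == "," or ch == ";" or ch.isspace()
def pvDelim (c : Char) : Bool := c = ',' || c = ';' || PySem.Chars.isspace c

-- Source B's for-loop over the characters, state (out, cur); the [] case is the
-- final `if cur: out.append(cur.lower())` after the loop
def pvScan (out : List String) (cur : List Char) : List Char → List String
  | [] => if cur.isEmpty then out else out ++ [String.ofList (PySem.Chars.lower cur)]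
  | c :: t =>
    if pvDelim c then
      if cur.isEmpty then pvScan out [] t
      else pvScan (out ++ [String.ofList (PySem.Chars.lower cur)]) [] t
    else pvScan out (cur ++ [c]) t

def tags_to_list_py_alt (tags : Option String) : List String :=
  match tags with
  | none => []
  | some s =>
    if s.toList.isEmpty then []
    else pvScan [] [] s.toList

-- ===== PRECONDITION & SPEC =====
def Spec_tags_to_list_py (tags : Option String) (out : List String) : Prop := out = tags_to_list_py_alt tags
instance (tags : Option String) (out : List String) : Decidable (Spec_tags_to_list_py tags out) := by unfold Spec_tags_to_list_py; infer_instance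

-- ===== CLAIM (what is proved, stated in full; the proofs are below) =====
def Claim_equal_tags_to_list_py : Prop := ∀ (tags : Option String), Dom_tags_to_list_py tags → Spec_tags_to_list_py tags (tags_to_list_py tags)

-- ===== LEMMAS AND PROOFS =====

-- the canonical tokenizing machine: maximal runs of non-D characters, appended to `out`
def pvM (D : Char → Bool) (out : List (List Char)) (cur : List Char) : List Char → List (List Char)
  | [] => if cur.isEmpty then out else out ++ [cur]
  | c :: t =>
    if D c then
      if cur.isEmpty then pvM D out [] t
      else pvM D (out ++ [cur]) [] t
    else pvM D out (cur ++ [c]) t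

-- split on one character, keeping empty pieces (Python s.split(k))
def pvSplit (k : Char) : List Char → List (List Char)
  | [] => [[]]
  | c :: t => if c = k then [] :: pvSplit k t else (pvSplit k t).modifyHead (c :: ·)

def pvSubst (c : Char) : Char := if c = ';' then ',' else c
def pvS : Char → Bool := PySem.Chars.isspace
def pvU (c : Char) : Bool := c = ',' || pvS c
def pvF (t : List Char) : String := String.ofList (PySem.Chars.lower t)
def pvFlush (cur : List Char) : List (List Char) := if cur.isEmpty then [] else [cur]

theorem pvSplit_cons_self (k : Char) (t : List Char) :
    pvSplit k (k :: t) = [] :: pvSplit k t := by simp [pvSplit]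

theorem pvSplit_cons_ne {c k : Char} (t : List Char) (h : c ≠ k) :
    pvSplit k (c :: t) = (pvSplit k t).modifyHead (c :: ·) := by simp [pvSplit, h]

theorem pvM_out (D : Char → Bool) (l : List Char) (out cur) :
    pvM D out cur l = out ++ pvM D [] cur l := by
  induction l generalizing out cur with
  | nil => simp only [pvM]; split <;> simp
  | cons c t ih =>
    simp only [pvM]
    split
    · split
      · exact ih out []
      · rw [ih (out ++ [_]) []]
        simp only [List.nil_append]
        rw [ih [_] []]
        simp
    · exact ih out (cur ++ [c])

theorem pvM_flush {D : Char → Bool} {c : Char} (h : D c = true) (t : List Char) (out cur) :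
    pvM D out cur (c :: t) = pvM D (out ++ pvFlush cur) [] t := by
  simp only [pvM, h, if_pos, pvFlush]
  by_cases hc : cur.isEmpty <;> simp [hc]

theorem pvM_allD (D : Char → Bool) (l : List Char) (out cur)
    (h : ∀ c ∈ l, D c = true) :
    pvM D out cur l = out ++ pvFlush cur := by
  induction l generalizing out cur with
  | nil => simp only [pvM, pvFlush]; by_cases hc : cur.isEmpty <;> simp [hc]
  | cons c t ih =>
    rw [pvM_flush (h c List.mem_cons_self)]
    rw [ih _ _ (fun x hx => h x (List.mem_cons_of_mem _ hx))]
    simp [pvFlush]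

theorem pvM_token_prefix (D : Char → Bool) (p rest : List Char) (out cur)
    (h : ∀ c ∈ p, D c = false) :
    pvM D out cur (p ++ rest) = pvM D out (cur ++ p) rest := by
  induction p generalizing cur with
  | nil => simp
  | cons c t ih =>
    simp only [List.cons_append, pvM, h c List.mem_cons_self]
    rw [ih (cur ++ [c]) (fun x hx => h x (List.mem_cons_of_mem _ hx))]
    simp

theorem pvM_closed (cur : List Char) (hcur : ∀ c ∈ cur, pvS c = false) :
    pvM pvS [] [] cur = pvFlush cur := by
  have h := pvM_token_prefix pvS cur [] [] [] hcur
  simp only [List.append_nil, List.nil_append] at h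
  rw [h]; rfl

theorem pvM_head_space {c : Char} (hs : pvS c = true) (cur p : List Char)
    (hcur : ∀ x ∈ cur, pvS x = false) :
    pvM pvS [] [] (cur ++ c :: p) = pvFlush cur ++ pvM pvS [] [] p := by
  have h := pvM_token_prefix pvS cur (c :: p) [] [] hcur
  simp only [List.nil_append] at h
  rw [h, pvM_flush hs, pvM_out]
  simp

theorem pvM_dropWhile (D : Char → Bool) (l : List Char) (out) :
    pvM D out [] (List.dropWhile D l) = pvM D out [] l := by
  induction l with
  | nil => rfl
  | cons c t ih =>
    by_cases h : D c
    · rw [List.dropWhile_cons_of_pos h, ih]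
      simp [pvM, h]
    · rw [List.dropWhile_cons_of_neg h]

theorem pvM_append_allD (D : Char → Bool) (xs ys : List Char) (out cur)
    (h : ∀ c ∈ ys, D c = true) :
    pvM D out cur (xs ++ ys) = pvM D out cur xs := by
  induction xs generalizing out cur with
  | nil =>
    simp only [List.nil_append]
    rw [pvM_allD D ys out cur h]
    simp only [pvM, pvFlush]
    by_cases hc : cur.isEmpty <;> simp [hc]
  | cons c t ih =>
    simp only [List.cons_append, pvM]
    split
    · split <;> exact ih _ _
    · exact ih _ _

theorem split₀_go_eq (l cur acc) :
    PySem.Chars.split₀.go l cur acc = acc.reverse ++ pvM pvS [] cur.reverse l := by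
  induction l generalizing cur acc with
  | nil =>
    simp only [PySem.Chars.split₀.go, pvM]
    by_cases hc : cur.isEmpty
    · have : cur = [] := by simpa [List.isEmpty_iff] using hc
      simp [this]
    · have hc' : cur ≠ [] := by simpa [List.isEmpty_iff] using hc
      have : cur.reverse.isEmpty = false := by simp [hc']
      simp [hc, this]
  | cons c t ih =>
    simp only [PySem.Chars.split₀.go]
    by_cases h : PySem.Chars.isspace c
    · rw [if_pos h]
      by_cases hc : cur.isEmpty
      · have hnil : cur = [] := by simpa [List.isEmpty_iff] using hc
        rw [if_pos hc, ih]
        simp [hnil, pvM, pvS, h]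
      · have hc' : cur ≠ [] := by simpa [List.isEmpty_iff] using hc
        rw [if_neg hc, ih]
        have hrev : cur.reverse.isEmpty = false := by simp [hc']
        simp only [pvM, pvS, h, if_pos, hrev, Bool.false_eq_true, if_neg, not_false_iff,
          List.reverse_cons, List.reverse_nil, List.nil_append]
        rw [pvM_out _ _ [cur.reverse] []]
        simp
    · rw [if_neg h, ih]
      simp [pvM, pvS, h]

theorem split₀_eq (l : List Char) : PySem.Chars.split₀ l = pvM pvS [] [] l := by
  simpa using split₀_go_eq l [] []

theorem pvM_strip (l : List Char) (out) :
    pvM pvS out [] (PySem.Chars.strip l) = pvM pvS out [] l := by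
  have hl : PySem.Chars.strip l = PySem.Chars.rstrip (List.dropWhile pvS l) := rfl
  set y := List.dropWhile pvS l with hy
  have hdecomp : y = PySem.Chars.rstrip y ++ (List.takeWhile pvS y.reverse).reverse := by
    unfold PySem.Chars.rstrip
    rw [← List.reverse_append,
      show List.dropWhile PySem.Chars.isspace y.reverse = List.dropWhile pvS y.reverse from rfl,
      List.takeWhile_append_dropWhile, List.reverse_reverse]
  have hall : ∀ c ∈ (List.takeWhile pvS y.reverse).reverse, pvS c = true := by
    intro c hc
    exact List.mem_takeWhile_imp (List.mem_reverse.mp hc)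
  calc pvM pvS out [] (PySem.Chars.strip l)
      = pvM pvS out [] (PySem.Chars.rstrip y) := by rw [hl]
    _ = pvM pvS out [] (PySem.Chars.rstrip y ++ (List.takeWhile pvS y.reverse).reverse) := by
        rw [pvM_append_allD _ _ _ _ _ hall]
    _ = pvM pvS out [] y := by rw [← hdecomp]
    _ = pvM pvS out [] l := by rw [hy, pvM_dropWhile]

theorem pvM_ne_nil (D : Char → Bool) (l : List Char) (out cur)
    (hout : ∀ x ∈ out, x ≠ []) :
    ∀ x ∈ pvM D out cur l, x ≠ [] := by
  induction l generalizing out cur with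
  | nil =>
    intro x hx
    simp only [pvM] at hx
    by_cases h : cur.isEmpty
    · rw [if_pos h] at hx; exact hout x hx
    · rw [if_neg h] at hx
      rcases List.mem_append.mp hx with h1 | h1
      · exact hout x h1
      · simp only [List.mem_singleton] at h1
        subst h1
        intro he; rw [he] at h; exact h rfl
  | cons c t ih =>
    intro x hx
    simp only [pvM] at hx
    by_cases hD : D c
    · rw [if_pos hD] at hx
      by_cases h : cur.isEmpty
      · rw [if_pos h] at hx; exact ih out [] hout x hx
      · rw [if_neg h] at hx
        refine ih _ [] ?_ x hx
        intro y hy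
        rcases List.mem_append.mp hy with h1 | h1
        · exact hout y h1
        · simp only [List.mem_singleton] at h1
          subst h1
          intro he; rw [he] at h; exact h rfl
    · rw [if_neg hD] at hx
      exact ih out (cur ++ [c]) hout x hx

theorem g_strip_eq (p : List Char) :
    (if (PySem.Chars.strip p).isEmpty then []
     else (PySem.Chars.split₀ (PySem.Chars.strip p)).filter (fun t => !t.isEmpty))
    = pvM pvS [] [] p := by
  by_cases h : (PySem.Chars.strip p).isEmpty
  · have h' : PySem.Chars.strip p = [] := by simpa [List.isEmpty_iff] using h
    rw [if_pos h, ← pvM_strip p [], h']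
    rfl
  · rw [if_neg h, split₀_eq]
    rw [List.filter_eq_self.mpr, pvM_strip]
    intro x hx
    have := pvM_ne_nil pvS (PySem.Chars.strip p) [] [] (by simp) x hx
    simpa [List.isEmpty_iff] using this

theorem pvSplit_ne_nil (k : Char) (l : List Char) : pvSplit k l ≠ [] := by
  induction l with
  | nil => simp [pvSplit]
  | cons c t ih =>
    simp only [pvSplit]
    split
    · simp
    · cases h : pvSplit k t with
      | nil => exact absurd h ih
      | cons p ps => simp

theorem modifyHead_nil_append (l : List (List Char)) :
    l.modifyHead (fun x => ([] : List Char) ++ x) = l := by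
  cases l <;> simp

theorem splitOn_go_eq (k : Char) (fuel : Nat) (l cur acc)
    (hf : l.length ≤ fuel) :
    PySem.Chars.splitOn.go [k] fuel l cur acc
      = acc.reverse ++ (pvSplit k l).modifyHead (cur.reverse ++ ·) := by
  induction fuel generalizing l cur acc with
  | zero =>
    have : l = [] := by simpa using List.length_eq_zero_iff.mp (Nat.le_zero.mp hf)
    subst this
    simp [PySem.Chars.splitOn.go, pvSplit]
  | succ n ih =>
    cases l with
    | nil => simp [PySem.Chars.splitOn.go, pvSplit]
    | cons c t =>
      simp only [PySem.Chars.splitOn.go]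
      by_cases h : c = k
      · have hpre : [k].isPrefixOf (c :: t) = true := by simp [List.isPrefixOf, h]
        simp only [hpre, if_pos]
        rw [ih _ _ _ (by simpa using Nat.le_of_succ_le_succ (by simpa using hf))]
        rw [h, pvSplit_cons_self]
        cases hps : pvSplit k t with
        | nil => exact absurd hps (pvSplit_ne_nil k t)
        | cons p ps => simp [List.modifyHead, hps]
      · have hpre : [k].isPrefixOf (c :: t) = false := by
          simp [List.isPrefixOf]; exact fun hk => absurd hk.symm h
        simp only [hpre, Bool.false_eq_true, if_neg, not_false_iff]
        rw [ih _ _ _ (by simpa using Nat.le_of_succ_le_succ (by simpa using hf))]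
        rw [pvSplit_cons_ne t h]
        cases hps : pvSplit k t with
        | nil => exact absurd hps (pvSplit_ne_nil k t)
        | cons p ps => simp

theorem splitOn_eq (k : Char) (l : List Char) :
    PySem.Chars.splitOn l [k] = (pvSplit k l) := by
  unfold PySem.Chars.splitOn
  rw [splitOn_go_eq k (l.length + 1) l [] [] (Nat.le_succ _)]
  simp only [List.reverse_nil]
  rw [modifyHead_nil_append, List.nil_append]

theorem pvSplit_not_mem (k : Char) (l : List Char) (h : k ∉ l) :
    pvSplit k l = [l] := by
  induction l with
  | nil => rfl
  | cons c t ih =>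
    rw [pvSplit_cons_ne t (by intro hc; exact h (hc ▸ List.mem_cons_self))]
    rw [ih (fun hm => h (List.mem_cons_of_mem _ hm))]
    rfl

theorem replace_go_eq (fuel : Nat) (l acc : List Char) (hf : l.length ≤ fuel) :
    PySem.Chars.replace.go [';'] [','] fuel l acc = acc.reverse ++ l.map pvSubst := by
  induction fuel generalizing l acc with
  | zero =>
    have : l = [] := by simpa using List.length_eq_zero_iff.mp (Nat.le_zero.mp hf)
    subst this
    simp [PySem.Chars.replace.go]
  | succ n ih =>
    cases l with
    | nil => simp [PySem.Chars.replace.go]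
    | cons c t =>
      simp only [PySem.Chars.replace.go]
      by_cases h : c = ';'
      · have hpre : [';'].isPrefixOf (c :: t) = true := by simp [List.isPrefixOf, h]
        simp only [hpre, if_pos]
        rw [ih _ _ (by simpa using Nat.le_of_succ_le_succ (by simpa using hf))]
        simp [pvSubst, h]
      · have hpre : [';'].isPrefixOf (c :: t) = false := by
          simp [List.isPrefixOf]; exact fun hk => absurd hk.symm h
        simp only [hpre, Bool.false_eq_true, if_neg, not_false_iff]
        rw [ih _ _ (by simpa using Nat.le_of_succ_le_succ (by simpa using hf))]
        simp [pvSubst, h]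

theorem replace_eq (l : List Char) :
    PySem.Chars.replace l [';'] [','] = l.map pvSubst := by
  unfold PySem.Chars.replace
  rw [if_neg (by simp)]
  simpa using replace_go_eq l.length l [] le_rfl

theorem no_semi (l : List Char) : ';' ∉ l.map pvSubst := by
  intro h
  rcases List.mem_map.mp h with ⟨c, _, hc⟩
  by_cases h' : c = ';' <;> simp [pvSubst, h'] at hc

-- the crux: comma-splitting then whitespace-tokenizing each piece is one tokenizing
-- pass on the union delimiter set
theorem pvG (cs : List Char) (out : List (List Char)) (cur : List Char)
    (hcur : ∀ c ∈ cur, pvS c = false ∧ c ≠ ',') :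
    out ++ ((pvSplit ',' cs).modifyHead (cur ++ ·)).flatMap (fun item => pvM pvS [] [] item)
      = pvM pvU out cur cs := by
  induction cs generalizing out cur with
  | nil =>
    show out ++ ([[]].modifyHead (cur ++ ·)).flatMap (fun item => pvM pvS [] [] item) = _
    simp only [List.modifyHead, List.flatMap_cons, List.flatMap_nil, List.append_nil]
    rw [pvM_closed _ (fun c hc => (hcur c hc).1)]
    simp only [pvM, pvFlush]
    by_cases h : cur.isEmpty <;> simp [h]
  | cons c t ih =>
    by_cases hc : c = ','
    · subst hc
      rw [pvSplit_cons_self]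
      simp only [List.modifyHead, List.flatMap_cons, List.append_nil]
      rw [pvM_closed _ (fun c hc => (hcur c hc).1)]
      rw [pvM_flush (show pvU ',' = true by simp [pvU])]
      have ihr := ih (out ++ pvFlush cur) [] (by simp)
      rw [modifyHead_nil_append] at ihr
      rw [← ihr]
      simp
    · cases hps : pvSplit ',' t with
      | nil => exact absurd hps (pvSplit_ne_nil ',' t)
      | cons p ps =>
        by_cases hs : pvS c
        · -- whitespace char: token break inside the comma-piece
          rw [pvSplit_cons_ne t hc, hps]
          simp only [List.modifyHead, List.flatMap_cons]
          rw [pvM_head_space hs cur p (fun x hx => (hcur x hx).1)]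
          rw [pvM_flush (show pvU c = true by simp [pvU, hs])]
          have ihr := ih (out ++ pvFlush cur) [] (by simp)
          rw [modifyHead_nil_append, hps, List.flatMap_cons] at ihr
          rw [← ihr]
          simp
        · -- ordinary char: it extends the current token
          rw [pvSplit_cons_ne t hc, hps]
          simp only [List.modifyHead, List.flatMap_cons]
          have hU : pvU c = false := by simp [pvU, hc, hs]
          have hinv : ∀ x ∈ cur ++ [c], pvS x = false ∧ x ≠ ',' := by
            intro x hx
            rcases List.mem_append.mp hx with h | h
            · exact hcur x h
            · simp only [List.mem_singleton] at h
              subst h; exact ⟨by simpa using hs, hc⟩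
          have ihr := ih out (cur ++ [c]) hinv
          rw [hps] at ihr
          simp only [List.modifyHead, List.flatMap_cons] at ihr
          simp only [pvM, hU, Bool.false_eq_true, if_neg, not_false_iff]
          rw [← ihr]
          simp
 
theorem pvM_subst (l : List Char) (out cur) :
    pvM pvU out cur (l.map pvSubst) = pvM pvDelim out cur l := by
  induction l generalizing out cur with
  | nil => rfl
  | cons c t ih =>
    simp only [List.map_cons, pvM]
    by_cases h : c = ';'
    · have h1 : pvSubst c = ',' := by simp [pvSubst, h]
      have h2 : pvU ',' = true := by simp [pvU]
      have h3 : pvDelim c = true := by simp [pvDelim, h]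
      simp only [h1, h2, h3, if_pos]
      split <;> exact ih _ _
    · have h1 : pvSubst c = c := by simp [pvSubst, h]
      have h2 : pvU c = pvDelim c := by
        unfold pvU pvDelim pvS
        simp [h]
      simp only [h1, h2]
      split
      · split <;> exact ih _ _
      · exact ih _ _

theorem pvScan_eq (l : List Char) (out : List (List Char)) (cur) :
    pvScan (out.map pvF) cur l = (pvM pvDelim out cur l).map pvF := by
  induction l generalizing out cur with
  | nil =>
    simp only [pvScan, pvM]
    split <;> simp [pvF]
  | cons c t ih =>
    simp only [pvScan, pvM]
    split
    · split
      · exact ih out []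
      · rw [← ih (out ++ [cur]) []]; simp [pvF]
    · exact ih out (cur ++ [c])

-- ===== VERDICT (by name: the statement is the Claim_ definition above) =====
theorem tags_to_list_py_spec : Claim_equal_tags_to_list_py := by
  intro tags _
  unfold Spec_tags_to_list_py
  cases tags with
  | none => rfl
  | some s =>
    unfold tags_to_list_py tags_to_list_py_alt
    by_cases h : s.toList.isEmpty
    · simp [h]
    · simp only [h, Bool.false_eq_true, if_neg, not_false_iff]
      rw [replace_eq, splitOn_eq, pvSplit_not_mem ';' _ (no_semi s.toList)]
      simp only [List.flatMap_cons, List.flatMap_nil, List.append_nil]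
      rw [splitOn_eq]
      have hfun : (fun (out : List (List Char)) item => if item.isEmpty = true then out
            else out ++ (PySem.Chars.split₀ item).filter (fun t => !t.isEmpty))
          = fun out item => out ++ (if item.isEmpty = true then []
            else (PySem.Chars.split₀ item).filter (fun t => !t.isEmpty)) := by
        funext o i
        by_cases hi : i.isEmpty <;> simp [hi]
      rw [hfun, PySem.List.foldl_append_eq_flatMap, List.nil_append, List.flatMap_map]
      rw [show (fun a => if (PySem.Chars.strip a).isEmpty = true then ([] : List (List Char))
            else List.filter (fun t => !t.isEmpty) (PySem.Chars.split₀ (PySem.Chars.strip a)))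
          = fun p => pvM pvS [] [] p from by
        funext p
        simpa using g_strip_eq p]
      have hG := pvG (s.toList.map pvSubst) [] [] (by simp)
      rw [modifyHead_nil_append, List.nil_append] at hG
      rw [hG, pvM_subst]
      rw [show pvScan [] [] s.toList = pvScan (List.map pvF []) [] s.toList from rfl,
        pvScan_eq]
      rfl
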